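-- pv_equiv track=rewrite | github.com/cambridge-quant/parallel-tempering | Parallel_Tempering.py | nn_check
-- ===== SOURCE A (Python) =====
-- def nn_check(p1, p2, lattice_width, n_dimension):
--     """
--     Check if two positions in the lattice are nearest neighbours
--
--     Parameters
--     ----------
--     p1 : NP.ARRAY
--         Position 1
--     p2 : NP.ARRAY
--         Position 2
--     lattice_width : INT
--         Width of lattice
--     n_dimension : INT
--         Number of lattice dimensions
--
--     Returns
--     -------
--     bool
--         True or false depending on if positions are nearest neighbours
--
--     """
--     same_pos_check = sum(1 for i in range(n_dimension) if p1[i] == p2[i])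
--     if same_pos_check == n_dimension - 1:
--         for j in range(n_dimension):
--             if p1[j] != p2[j]:
--                 index = j
--         if p2[index] == (p1[index]+1)%lattice_width or p2[index] == (p1[index]-1)%lattice_width:
--             return True
--     else:
--         return False
-- ===== SOURCE B (Python) =====
-- def nn_check(p1, p2, lattice_width, n_dimension):
--     # Single pass with early exit: track the one differing dimension; bail out
--     # as soon as a second difference is seen.  Falls through to implicit None
--     # (like A) when the single differing dimension is not a lattice neighbour.
--     found = None
--     for i in range(n_dimension):
--         if p1[i] != p2[i]:
--             if found is not None:
--                 return False
--             found = i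
--     if found is None:
--         return False
--     if p2[found] == (p1[found] + 1) % lattice_width or p2[found] == (p1[found] - 1) % lattice_width:
--         return True
-- ===== Notes on version B (the rewrite author's own statement) =====
-- stated objective: simpler
-- what changed: Replaces A's two full passes (count equal dimensions, then rescan for the differing index) by one short-circuiting pass that records the single differing index and returns False as soon as a second difference appears.
import Mathlib
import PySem

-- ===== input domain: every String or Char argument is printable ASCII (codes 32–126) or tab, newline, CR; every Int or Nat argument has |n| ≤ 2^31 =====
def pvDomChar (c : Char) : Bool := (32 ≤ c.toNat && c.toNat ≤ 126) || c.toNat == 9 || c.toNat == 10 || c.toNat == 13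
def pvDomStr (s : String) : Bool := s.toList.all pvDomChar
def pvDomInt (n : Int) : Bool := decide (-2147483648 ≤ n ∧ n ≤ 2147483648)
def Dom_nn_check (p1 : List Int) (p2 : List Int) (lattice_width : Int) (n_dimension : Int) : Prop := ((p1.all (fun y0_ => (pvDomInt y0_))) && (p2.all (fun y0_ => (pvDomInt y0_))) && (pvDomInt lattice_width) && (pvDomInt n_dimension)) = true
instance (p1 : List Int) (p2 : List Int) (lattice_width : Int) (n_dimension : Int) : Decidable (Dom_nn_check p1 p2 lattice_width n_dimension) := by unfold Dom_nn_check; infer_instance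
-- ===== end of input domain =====

-- B is a single short-circuiting pass (record the differing index, bail out on a second
-- difference) instead of A's two full passes (count equal dimensions, then rescan for the index).
-- Both programs fall through to None when the single differing dimension is not a neighbour.

-- ===== PORT A =====
-- Indexing p1[i]/p2[i] is ported as pyGetD · · 0; Pre_ guarantees every index is in range,
-- so the default 0 is never consulted on admitted inputs (exact there).
def nn_check (p1 : List Int) (p2 : List Int) (lattice_width : Int) (n_dimension : Int) : Option Bool :=
  -- same_pos_check = sum(1 for i in range(n_dimension) if p1[i] == p2[i])
  let same_pos_check : Int :=
    (PySem.List.pyRange 0 n_dimension 1).foldl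
      (fun acc i => if PySem.List.pyGetD p1 i 0 = PySem.List.pyGetD p2 i 0 then acc + 1 else acc) 0
  if same_pos_check = n_dimension - 1 then
    -- for j in range(n_dimension): if p1[j] != p2[j]: index = j
    -- (initial value 0 is arbitrary: in Python `index` is unassigned until the first
    --  difference, and the branch is only reached when a difference exists)
    let index : Int :=
      (PySem.List.pyRange 0 n_dimension 1).foldl
        (fun acc j => if PySem.List.pyGetD p1 j 0 ≠ PySem.List.pyGetD p2 j 0 then j else acc) 0
    if PySem.List.pyGetD p2 index 0 = PySem.Int.mod (PySem.List.pyGetD p1 index 0 + 1) lattice_width ∨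
       PySem.List.pyGetD p2 index 0 = PySem.Int.mod (PySem.List.pyGetD p1 index 0 - 1) lattice_width then
      some true
    else none  -- falls off the end: implicit None
  else some false

-- ===== PORT B =====
-- the loop of Source B: state `found`; `none` result = early `return False` on a second difference
def nnAltLoop (p1 p2 : List Int) (found : Option Int) : List Int → Option (Option Int)
  | [] => some found
  | i :: rest =>
    if PySem.List.pyGetD p1 i 0 ≠ PySem.List.pyGetD p2 i 0 then
      match found with
      | some _ => none
      | none => nnAltLoop p1 p2 (some i) rest
    else nnAltLoop p1 p2 found rest

def nn_check_alt (p1 : List Int) (p2 : List Int) (lattice_width : Int) (n_dimension : Int) : Option Bool :=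
  match nnAltLoop p1 p2 none (PySem.List.pyRange 0 n_dimension 1) with
  | none => some false          -- early `return False`: second difference seen
  | some none => some false     -- loop ended with no difference found
  | some (some idx) =>
    if PySem.List.pyGetD p2 idx 0 = PySem.Int.mod (PySem.List.pyGetD p1 idx 0 + 1) lattice_width ∨
       PySem.List.pyGetD p2 idx 0 = PySem.Int.mod (PySem.List.pyGetD p1 idx 0 - 1) lattice_width then
      some true
    else none  -- falls off the end: implicit None

-- ===== PRECONDITION & SPEC =====
-- Pre_ excludes exactly the raising inputs: IndexError when n_dimension exceeds a list
-- length, and ZeroDivisionError when lattice_width = 0 and exactly one dimension differs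
-- (only then is % evaluated).
def Pre_nn_check (p1 : List Int) (p2 : List Int) (lattice_width : Int) (n_dimension : Int) : Prop :=
  (0 < n_dimension → n_dimension ≤ (p1.length : Int) ∧ n_dimension ≤ (p2.length : Int)) ∧
  (lattice_width = 0 →
    (PySem.List.pyRange 0 n_dimension 1).countP
      (fun i => PySem.List.pyGetD p1 i 0 ≠ PySem.List.pyGetD p2 i 0) ≠ 1)
instance (p1 : List Int) (p2 : List Int) (lattice_width : Int) (n_dimension : Int) : Decidable (Pre_nn_check p1 p2 lattice_width n_dimension) := by unfold Pre_nn_check; infer_instance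
def pvWitness_nn_check : List Int × List Int × Int × Int := ([0, 0], [0, 1], 3, 2)

def Spec_nn_check (p1 : List Int) (p2 : List Int) (lattice_width : Int) (n_dimension : Int) (out : Option Bool) : Prop := out = nn_check_alt p1 p2 lattice_width n_dimension
instance (p1 : List Int) (p2 : List Int) (lattice_width : Int) (n_dimension : Int) (out : Option Bool) : Decidable (Spec_nn_check p1 p2 lattice_width n_dimension out) := by unfold Spec_nn_check; infer_instance

-- ===== CLAIM (what is proved, stated in full; the proofs are below) =====
def Claim_equal_nn_check : Prop := ∀ (p1 : List Int) (p2 : List Int) (lattice_width : Int) (n_dimension : Int), Dom_nn_check p1 p2 lattice_width n_dimension → Pre_nn_check p1 p2 lattice_width n_dimension → Spec_nn_check p1 p2 lattice_width n_dimension (nn_check p1 p2 lattice_width n_dimension)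

-- ===== LEMMAS AND PROOFS =====

-- counting fold = countP (over Int accumulator)
theorem pv_foldl_count (p : Int → Prop) [DecidablePred p] (l : List Int) (c : Int) :
    l.foldl (fun acc i => if p i then acc + 1 else acc) c = c + l.countP (fun i => decide (p i)) := by
  induction l generalizing c with
  | nil => simp
  | cons i t ih =>
    by_cases h : p i <;> simp [List.countP_cons, h, ih] <;> ring

-- A's index fold leaves the accumulator untouched when no element differs
theorem pv_lastFold_zero (p1 p2 : List Int) (l : List Int) (a : Int)
    (h : l.countP (fun i => decide (PySem.List.pyGetD p1 i 0 ≠ PySem.List.pyGetD p2 i 0)) = 0) :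
    l.foldl (fun acc j => if PySem.List.pyGetD p1 j 0 ≠ PySem.List.pyGetD p2 j 0 then j else acc) a = a := by
  induction l generalizing a with
  | nil => rfl
  | cons i t ih =>
    simp only [List.countP_cons] at h
    by_cases hd : PySem.List.pyGetD p1 i 0 ≠ PySem.List.pyGetD p2 i 0
    · simp [hd] at h
    · simp only [List.foldl_cons, if_neg hd]
      exact ih a (by simpa [hd] using h)

-- B's loop in the `some`-state: returns `some (some i)` iff no further difference
theorem pv_loop_some (p1 p2 : List Int) (l : List Int) (i : Int) :
    nnAltLoop p1 p2 (some i) l =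
      if l.countP (fun j => decide (PySem.List.pyGetD p1 j 0 ≠ PySem.List.pyGetD p2 j 0)) = 0
      then some (some i) else none := by
  induction l with
  | nil => simp [nnAltLoop]
  | cons x t ih =>
    by_cases hd : PySem.List.pyGetD p1 x 0 ≠ PySem.List.pyGetD p2 x 0
    · simp [nnAltLoop, hd, List.countP_cons]
    · simp [nnAltLoop, hd, List.countP_cons, ih]

-- B's loop from the start, characterised by the difference count; with exactly one
-- difference the index returned equals A's last-difference fold.
theorem pv_loop_char (p1 p2 : List Int) (l : List Int) :
    nnAltLoop p1 p2 none l =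
      (if l.countP (fun j => decide (PySem.List.pyGetD p1 j 0 ≠ PySem.List.pyGetD p2 j 0)) = 0 then some none
       else if l.countP (fun j => decide (PySem.List.pyGetD p1 j 0 ≠ PySem.List.pyGetD p2 j 0)) = 1 then
         some (some (l.foldl (fun acc j => if PySem.List.pyGetD p1 j 0 ≠ PySem.List.pyGetD p2 j 0 then j else acc) 0))
       else none) := by
  induction l with
  | nil => simp [nnAltLoop]
  | cons x t ih =>
    simp only [nnAltLoop, List.countP_cons, List.foldl_cons]
    by_cases hd : PySem.List.pyGetD p1 x 0 ≠ PySem.List.pyGetD p2 x 0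
    · have hdx : decide (PySem.List.pyGetD p1 x 0 ≠ PySem.List.pyGetD p2 x 0) = true :=
        decide_eq_true hd
      rw [if_pos hd, if_pos hd, pv_loop_some]
      simp only [hdx, cond_true]
      by_cases hc : t.countP (fun j => decide (PySem.List.pyGetD p1 j 0 ≠ PySem.List.pyGetD p2 j 0)) = 0
      · rw [pv_lastFold_zero p1 p2 t x hc]
        simp [hc]
      · have h1 : t.countP (fun j => decide (PySem.List.pyGetD p1 j 0 ≠ PySem.List.pyGetD p2 j 0)) + 1 ≠ 0 := by omega
        have h2 : t.countP (fun j => decide (PySem.List.pyGetD p1 j 0 ≠ PySem.List.pyGetD p2 j 0)) + 1 ≠ 1 := by omega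
        have hc' : ¬ ∀ a ∈ t, PySem.List.pyGetD p1 a 0 = PySem.List.pyGetD p2 a 0 := by
          simpa using hc
        simp [hc, hc', h1, h2]
    · have hdx : decide (PySem.List.pyGetD p1 x 0 ≠ PySem.List.pyGetD p2 x 0) = false :=
        decide_eq_false hd
      rw [if_neg hd, if_neg hd]
      simp only [hdx, cond_false, Nat.add_zero]
      exact ih

-- the two counts (equal / different at the sampled indices) partition the index list
theorem pv_count_sum (p1 p2 : List Int) (l : List Int) :
    l.countP (fun i => decide (PySem.List.pyGetD p1 i 0 = PySem.List.pyGetD p2 i 0)) +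
      l.countP (fun j => decide (PySem.List.pyGetD p1 j 0 ≠ PySem.List.pyGetD p2 j 0)) = l.length := by
  induction l with
  | nil => rfl
  | cons x t ih =>
    simp only [List.countP_cons, List.length_cons]
    by_cases h : PySem.List.pyGetD p1 x 0 = PySem.List.pyGetD p2 x 0
    · have h1 : decide (PySem.List.pyGetD p1 x 0 = PySem.List.pyGetD p2 x 0) = true := decide_eq_true h
      have h2 : decide (PySem.List.pyGetD p1 x 0 ≠ PySem.List.pyGetD p2 x 0) = false :=
        decide_eq_false (by simpa using h)
      simp only [h1, h2, Bool.false_eq_true, reduceIte]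
      omega
    · have h1 : decide (PySem.List.pyGetD p1 x 0 = PySem.List.pyGetD p2 x 0) = false := decide_eq_false h
      have h2 : decide (PySem.List.pyGetD p1 x 0 ≠ PySem.List.pyGetD p2 x 0) = true := decide_eq_true h
      simp only [h1, h2, Bool.false_eq_true, reduceIte]
      omega

theorem pv_len_range (n : Int) : ((PySem.List.pyRange 0 n 1).length : Int) = max n 0 := by
  rw [PySem.List.length_pyRange_one]
  omega

-- ===== VERDICT (by name: the statement is the Claim_ definition above) =====
theorem nn_check_spec : Claim_equal_nn_check := by
  intro p1 p2 lattice_width n_dimension _ _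
  unfold Spec_nn_check nn_check nn_check_alt
  rw [pv_loop_char, pv_foldl_count]
  have hsum := pv_count_sum p1 p2 (PySem.List.pyRange 0 n_dimension 1)
  have hlen := pv_len_range n_dimension
  set cd := (PySem.List.pyRange 0 n_dimension 1).countP
      (fun j => decide (PySem.List.pyGetD p1 j 0 ≠ PySem.List.pyGetD p2 j 0)) with hcd
  set ce := (PySem.List.pyRange 0 n_dimension 1).countP
      (fun i => decide (PySem.List.pyGetD p1 i 0 = PySem.List.pyGetD p2 i 0)) with hce
  by_cases hb : (ce : Int) = n_dimension - 1
  · have hcd1 : cd = 1 := by omega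
    simp [hb, hcd1]
  · have hcdne : cd ≠ 1 := by omega
    rcases Nat.eq_zero_or_pos cd with h0 | hpos
    · simp [hb, h0]
    · have h0 : ¬ cd = 0 := by omega
      simp [hb, h0, hcdne]
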